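-- pv_equiv track=rewrite | github.com/uplihong/csa_plus | scripts/summarize_stage1_bench.py | unique_or_mixed
-- ===== SOURCE A (Python) =====
-- def unique_or_mixed(rows, key):
--     values = {str(row.get(key, "")) for row in rows}
--     values.discard("")
--     if not values:
--         return ""
--     if len(values) == 1:
--         return next(iter(values))
--     return "mixed"
-- ===== SOURCE B (Python) =====
-- def unique_or_mixed(rows, key):
--     found = None
--     for row in rows:
--         v = str(row.get(key, ""))
--         if v == "":
--             continue
--         if found is None:
--             found = v
--         elif v != found:
--             return "mixed"
--     return found if found is not None else ""
-- ===== Notes on version B (the rewrite author's own statement) =====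
-- stated objective: simpler
-- what changed: Replaces building the full distinct-value set and inspecting its size with a single pass keeping one candidate value that early-returns 'mixed' on the second distinct non-empty value.
import Mathlib
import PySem

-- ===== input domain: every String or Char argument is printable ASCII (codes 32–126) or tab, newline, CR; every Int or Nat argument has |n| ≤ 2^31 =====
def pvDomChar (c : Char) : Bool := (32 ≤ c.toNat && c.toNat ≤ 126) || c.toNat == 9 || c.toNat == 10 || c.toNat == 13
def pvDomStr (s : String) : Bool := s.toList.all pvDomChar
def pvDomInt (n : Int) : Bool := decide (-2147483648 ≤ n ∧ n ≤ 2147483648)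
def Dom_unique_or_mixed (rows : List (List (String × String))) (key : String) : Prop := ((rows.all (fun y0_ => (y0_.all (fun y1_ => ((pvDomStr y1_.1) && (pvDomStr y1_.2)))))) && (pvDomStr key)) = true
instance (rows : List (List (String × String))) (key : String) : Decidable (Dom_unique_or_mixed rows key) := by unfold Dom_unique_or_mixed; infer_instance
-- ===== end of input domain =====

-- B replaces A's distinct-value set (built fully, then sized) with a single pass that keeps one
-- candidate non-empty value and early-returns "mixed" on a second distinct one: simpler control flow.


-- ===== PORT A =====
-- str(row.get(key, "")) on a string value is the identity, so str() is dropped;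
-- next(iter(values)) is read only when len(values) == 1, where it is order-independent (headD "").
def unique_or_mixed (rows : List (List (String × String))) (key : String) : String :=
  let values : PySem.Set String :=
    PySem.Set.ofList (rows.map (fun row => PySem.Dict.getD (PySem.Dict.mk row) key ""))
  let values := PySem.Set.discard values ""
  if PySem.Set.len values = 0 then ""
  else if PySem.Set.len values = 1 then values.headD ""
  else "mixed"

-- ===== PORT B =====
def uomGo (key : String) (found : Option String) : List (List (String × String)) → String
  | [] => match found with
          | none => ""
          | some f => f
  | row :: rs =>
    let v := PySem.Dict.getD (PySem.Dict.mk row) key ""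
    if v = "" then uomGo key found rs
    else match found with
         | none => uomGo key (some v) rs
         | some f => if v ≠ f then "mixed" else uomGo key found rs

def unique_or_mixed_alt (rows : List (List (String × String))) (key : String) : String :=
  uomGo key none rows

-- ===== PRECONDITION & SPEC =====
def Spec_unique_or_mixed (rows : List (List (String × String))) (key : String) (out : String) : Prop := out = unique_or_mixed_alt rows key
instance (rows : List (List (String × String))) (key : String) (out : String) : Decidable (Spec_unique_or_mixed rows key out) := by unfold Spec_unique_or_mixed; infer_instance

-- ===== CLAIM (what is proved, stated in full; the proofs are below) =====
def Claim_equal_unique_or_mixed : Prop := ∀ (rows : List (List (String × String))) (key : String), Dom_unique_or_mixed rows key → Spec_unique_or_mixed rows key (unique_or_mixed rows key)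

-- ===== LEMMAS AND PROOFS =====

-- A's finalization: discard "", then decide by the size of the set.
def uomFin (s : PySem.Set String) : String :=
  let t := PySem.Set.discard s ""
  if PySem.Set.len t = 0 then ""
  else if PySem.Set.len t = 1 then t.headD ""
  else "mixed"

theorem discard_len_le_add (s : List String) (v : String) :
    (PySem.Set.discard s "").length ≤ (PySem.Set.discard (PySem.Set.add s v) "").length := by
  by_cases h : v ∈ s
  · rw [PySem.Set.add_of_mem h]
  · rw [PySem.Set.add_of_not_mem h]
    simp only [PySem.Set.discard, List.filter_append, List.length_append]
    omega

theorem fin_mixed_of_two (key : String) :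
    ∀ (rows : List (List (String × String))) (s : List String),
      2 ≤ (PySem.Set.discard s "").length →
      uomFin (rows.foldl (fun s row => PySem.Set.add s (PySem.Dict.getD (PySem.Dict.mk row) key "")) s) = "mixed" := by
  intro rows
  induction rows with
  | nil =>
    intro s h
    have h0 : ¬ ((PySem.Set.discard s "").length = 0) := by omega
    have h1 : ¬ ((PySem.Set.discard s "").length = 1) := by omega
    simp [uomFin, PySem.Set.len, h0, h1]
  | cons r rs ih =>
    intro s h
    simp only [List.foldl_cons]
    exact ih _ (le_trans h (discard_len_le_add s _))

-- loop invariant: `found` summarizes the non-empty part of the set accumulator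
theorem uomGo_eq_fin (key : String) :
    ∀ (rows : List (List (String × String))) (s : List String) (found : Option String),
      ((found = none ∧ PySem.Set.discard s "" = ([] : List String)) ∨
       (∃ f, found = some f ∧ f ≠ "" ∧ PySem.Set.discard s "" = [f])) →
      uomGo key found rows =
        uomFin (rows.foldl (fun s row => PySem.Set.add s (PySem.Dict.getD (PySem.Dict.mk row) key "")) s) := by
  intro rows
  induction rows with
  | nil =>
    intro s found hinv
    rcases hinv with ⟨hn, hs⟩ | ⟨f, hf, hne, hs⟩
    · subst hn
      simp [uomGo, uomFin, hs, PySem.Set.len]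
    · subst hf
      simp [uomGo, uomFin, hs, PySem.Set.len]
  | cons r rs ih =>
    intro s found hinv
    simp only [List.foldl_cons, uomGo]
    set v := PySem.Dict.getD (PySem.Dict.mk r) key "" with hv
    by_cases hve : v = ""
    · rw [if_pos hve]
      apply ih
      have hadd : PySem.Set.discard (PySem.Set.add s v) "" = PySem.Set.discard s "" := by
        by_cases hmem : v ∈ s
        · rw [PySem.Set.add_of_mem hmem]
        · rw [PySem.Set.add_of_not_mem hmem]
          simp [PySem.Set.discard, List.filter_append, hve]
      rw [hadd]; exact hinv
    · rw [if_neg hve]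
      rcases hinv with ⟨hn, hs⟩ | ⟨f, hf, hne, hs⟩
      · subst hn
        apply ih
        right
        refine ⟨v, rfl, hve, ?_⟩
        have hmem : v ∉ s := by
          intro hm
          have : v ∈ PySem.Set.discard s "" := by
            simp [PySem.Set.discard, List.mem_filter, hm, hve]
          rw [hs] at this; exact absurd this (List.not_mem_nil)
        rw [PySem.Set.add_of_not_mem hmem]
        simp [PySem.Set.discard, List.filter_append, hve] at hs ⊢
        exact hs
      · subst hf
        show (if v ≠ f then "mixed" else uomGo key (some f) rs) = _
        by_cases hvf : v = f
        · rw [if_neg (by simp [hvf])]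
          apply ih
          have hmem : f ∈ s := by
            have : f ∈ PySem.Set.discard s "" := by rw [hs]; exact List.mem_singleton_self f
            exact (List.mem_filter.mp this).1
          rw [hvf, PySem.Set.add_of_mem hmem]
          exact Or.inr ⟨f, rfl, hne, hs⟩
        · rw [if_pos hvf]
          have hmem : v ∉ s := by
            intro hm
            have : v ∈ PySem.Set.discard s "" := by
              simp [PySem.Set.discard, List.mem_filter, hm, hve]
            rw [hs] at this
            exact hvf (List.mem_singleton.mp this)
          have h2 : 2 ≤ (PySem.Set.discard (PySem.Set.add s v) "").length := by
            rw [PySem.Set.add_of_not_mem hmem]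
            simp only [PySem.Set.discard, List.filter_append]
            rw [show List.filter (fun y => !y == "") s = [f] from hs]
            simp [hve]
          exact (fin_mixed_of_two key rs _ h2).symm

-- ===== VERDICT (by name: the statement is the Claim_ definition above) =====
theorem unique_or_mixed_spec : Claim_equal_unique_or_mixed := by
  intro rows key _
  unfold Spec_unique_or_mixed unique_or_mixed_alt
  rw [uomGo_eq_fin key rows [] none (Or.inl ⟨rfl, rfl⟩)]
  simp only [unique_or_mixed, uomFin, PySem.Set.ofList, PySem.Set.empty, List.foldl_map]
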